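-- pv_equiv track=rewrite | github.com/MoraHol/dataStructure-course | PycharmProjects/Fundamentos-estruc-datos/InteriorRombo/InteriorRombo/InteriorRombo.py | RomboPares
-- ===== SOURCE A (Python) =====
-- def inicializacionMatriz(m): ##inicializa la matriz en 0 con el tamaño m
--     matriz = []
--     for x in range(0, m):
--         matriz.append([0] * m)
--
--     return matriz
--
-- def RomboPares(matriz, m): ## funcion para guardar los valores del interior de un rombo con tamaño par
--     k = int(matriz.__len__() / 2)
--     u = k - 1
--
--     matriz2 = inicializacionMatriz(m) ## inicializando la matriz para alojar las pocisiones del rombo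
--
--     for i in range(0, k): ## aloja la diagonal superior izquierda
--         for j in range(u, k):
--             matriz2[i][j] = matriz[i][j]
--
--         u -= 1
--     u = 0
--     for i in range(k, matriz.__len__()): ##aloja la diagonal inferior izquierda
--         for j in range(u, k):
--             matriz2[i][j] = matriz[i][j]
--         u += 1
--     u = k + 1
--     for i in range(0, k): ## aloja la diagonal superior derecha
--         for j in range(k, u):
--             matriz2[i][j] = matriz[i][j]
--         u += 1
--     u = matriz.__len__()
--
--     for i in range(k, matriz.__len__()): ## aloja la diagonal inferior derecha
--         for j in range(k, u):
--             matriz2[i][j] = matriz[i][j]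
--         u -= 1
--     return matriz2
-- ===== SOURCE B (Python) =====
-- def RomboPares(matriz, m):
--     ## single row scan with computed diamond column bounds instead of four corner-marching loops
--     n = len(matriz)
--     k = n // 2
--     out = []
--     for i in range(m):
--         if i < n:
--             if i < k:
--                 lo, hi = k - 1 - i, k + i
--             else:
--                 lo, hi = i - k, n - 1 - i + k
--             out.append([matriz[i][j] if lo <= j <= hi else 0 for j in range(m)])
--         else:
--             out.append([0] * m)
--     return out
-- ===== Notes on version B (the rewrite author's own statement) =====
-- stated objective: simpler
-- what changed: Replaces the four corner-marching nested sweeps that mutate a preallocated zero matrix with a single row scan that computes the diamond's inclusive column bounds per row and builds each output row directly.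
import Mathlib
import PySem

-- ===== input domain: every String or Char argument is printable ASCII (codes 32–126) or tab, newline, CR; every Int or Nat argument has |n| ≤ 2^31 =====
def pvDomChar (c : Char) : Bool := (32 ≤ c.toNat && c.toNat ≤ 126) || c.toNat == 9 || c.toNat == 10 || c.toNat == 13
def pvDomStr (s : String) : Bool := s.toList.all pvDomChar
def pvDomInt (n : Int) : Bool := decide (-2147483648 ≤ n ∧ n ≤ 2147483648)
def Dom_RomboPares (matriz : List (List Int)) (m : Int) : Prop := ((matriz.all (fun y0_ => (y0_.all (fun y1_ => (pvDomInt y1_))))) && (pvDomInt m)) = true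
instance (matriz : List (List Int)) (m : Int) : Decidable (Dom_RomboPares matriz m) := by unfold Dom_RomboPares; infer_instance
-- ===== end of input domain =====

-- B replaces A's four corner-marching nested sweeps over a preallocated zero matrix by a single row
-- scan that computes the diamond's inclusive column bounds per row and builds each output row directly.

-- ===== PORT A =====
-- [0]*m: List.replicate m.toNat 0 is exact (Python's list*int gives [] for m ≤ 0)
def pvInicializacionMatriz (m : Int) : List (List Int) :=
  (PySem.List.pyRange 0 m 1).foldl (fun acc _ => acc ++ [List.replicate m.toNat 0]) []

-- matriz2[i][j] = v; exact for 0 ≤ i, j within bounds (Python raises IndexError otherwise;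
-- such inputs are excluded by Pre_RomboPares)
def pvUpd (mat : List (List Int)) (i j v : Int) : List (List Int) :=
  mat.set i.toNat ((mat.getD i.toNat []).set j.toNat v)

def RomboPares (matriz : List (List Int)) (m : Int) : List (List Int) :=
  -- k = int(len(matriz)/2): the length is nonnegative, so this is floor division by 2
  let n : Int := PySem.List.len matriz
  let k : Int := PySem.Int.floordiv n 2
  let mat0 := pvInicializacionMatriz m
  -- upper-left sweep: u starts at k-1 and is decremented after each row
  let s1 := (PySem.List.pyRange 0 k 1).foldl
    (fun (st : List (List Int) × Int) i =>
      ((PySem.List.pyRange st.2 k 1).foldl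
        (fun m2 j => pvUpd m2 i j ((matriz.getD i.toNat []).getD j.toNat 0)) st.1, st.2 - 1))
    (mat0, k - 1)
  -- lower-left sweep: u restarts at 0 and is incremented
  let s2 := (PySem.List.pyRange k n 1).foldl
    (fun (st : List (List Int) × Int) i =>
      ((PySem.List.pyRange st.2 k 1).foldl
        (fun m2 j => pvUpd m2 i j ((matriz.getD i.toNat []).getD j.toNat 0)) st.1, st.2 + 1))
    (s1.1, 0)
  -- upper-right sweep: u restarts at k+1 and is incremented
  let s3 := (PySem.List.pyRange 0 k 1).foldl
    (fun (st : List (List Int) × Int) i =>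
      ((PySem.List.pyRange k st.2 1).foldl
        (fun m2 j => pvUpd m2 i j ((matriz.getD i.toNat []).getD j.toNat 0)) st.1, st.2 + 1))
    (s2.1, k + 1)
  -- lower-right sweep: u restarts at n and is decremented
  let s4 := (PySem.List.pyRange k n 1).foldl
    (fun (st : List (List Int) × Int) i =>
      ((PySem.List.pyRange k st.2 1).foldl
        (fun m2 j => pvUpd m2 i j ((matriz.getD i.toNat []).getD j.toNat 0)) st.1, st.2 - 1))
    (s3.1, n)
  s4.1

-- ===== PORT B =====
def RomboPares_alt (matriz : List (List Int)) (m : Int) : List (List Int) :=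
  let n : Int := PySem.List.len matriz
  let k : Int := PySem.Int.floordiv n 2
  (PySem.List.pyRange 0 m 1).map (fun i =>
    if i < n then
      -- diamond column bounds of row i, inclusive
      let lo : Int := if i < k then k - 1 - i else i - k
      let hi : Int := if i < k then k + i else n - 1 - i + k
      (PySem.List.pyRange 0 m 1).map (fun j =>
        if lo ≤ j ∧ j ≤ hi then (matriz.getD i.toNat []).getD j.toNat 0 else 0)
    else List.replicate m.toNat 0)

-- ===== PRECONDITION & SPEC =====
-- Pre_ excludes exactly the inputs on which the Python A raises IndexError: a nonempty matriz with
-- m < len(matriz) (the m×m output cannot hold the diamond) or with a row i shorter than the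
-- diamond's rightmost column in that row plus one.
def Pre_RomboPares (matriz : List (List Int)) (m : Int) : Prop :=
  matriz = [] ∨
    ((matriz.length : Int) ≤ m ∧
     ∀ i ∈ List.range matriz.length,
       (if i < matriz.length / 2 then matriz.length / 2 + i + 1
        else matriz.length + matriz.length / 2 - i) ≤ (matriz.getD i []).length)
instance (matriz : List (List Int)) (m : Int) : Decidable (Pre_RomboPares matriz m) := by
  unfold Pre_RomboPares; infer_instance

def pvWitness_RomboPares : List (List Int) × Int := ([[1, 2], [3, 4]], 2)

def Spec_RomboPares (matriz : List (List Int)) (m : Int) (out : List (List Int)) : Prop := out = RomboPares_alt matriz m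
instance (matriz : List (List Int)) (m : Int) (out : List (List Int)) : Decidable (Spec_RomboPares matriz m out) := by unfold Spec_RomboPares; infer_instance

-- ===== CLAIM (what is proved, stated in full; the proofs are below) =====
def Claim_equal_RomboPares : Prop := ∀ (matriz : List (List Int)) (m : Int), Dom_RomboPares matriz m → Pre_RomboPares matriz m → Spec_RomboPares matriz m (RomboPares matriz m)

-- ===== LEMMAS AND PROOFS =====

-- proof-only helpers: the value A writes at cell p, and "painting" a list of cells
def pvVal (matriz : List (List Int)) (p : Int × Int) : Int :=
  (matriz.getD p.1.toNat []).getD p.2.toNat 0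

def pvPaint (matriz mat : List (List Int)) (ps : List (Int × Int)) : List (List Int) :=
  ps.foldl (fun st p => pvUpd st p.1 p.2 (pvVal matriz p)) mat

def pvEntry (mat : List (List Int)) (i j : Nat) : Int := (mat.getD i []).getD j 0

-- the list of diamond cells A paints, in A's order (K = N / 2)
def pvDiamond (N : Nat) : List (Int × Int) :=
  ((PySem.List.pyRange 0 (N / 2 : Nat) 1).flatMap
      (fun i => (PySem.List.pyRange ((N / 2 : Nat) - 1 - i) (N / 2 : Nat) 1).map (fun j => (i, j)))) ++
  ((PySem.List.pyRange (N / 2 : Nat) N 1).flatMap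
      (fun i => (PySem.List.pyRange (i - (N / 2 : Nat)) (N / 2 : Nat) 1).map (fun j => (i, j)))) ++
  ((PySem.List.pyRange 0 (N / 2 : Nat) 1).flatMap
      (fun i => (PySem.List.pyRange (N / 2 : Nat) ((N / 2 : Nat) + 1 + i) 1).map (fun j => (i, j)))) ++
  ((PySem.List.pyRange (N / 2 : Nat) N 1).flatMap
      (fun i => (PySem.List.pyRange (N / 2 : Nat) ((N : Int) - (i - (N / 2 : Nat))) 1).map (fun j => (i, j))))

lemma pv_getD_set {A : Type} (l : List A) (a r : Nat) (x d : A) :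
    (l.set a x).getD r d = if a = r ∧ a < l.length then x else l.getD r d := by
  rcases Nat.lt_or_ge r l.length with h | h
  · rw [List.getD_eq_getElem _ _ (by simpa using h), List.getD_eq_getElem _ _ h, List.getElem_set]
    split_ifs with h1 h2 h3 <;> simp_all
  · rw [List.getD_eq_default _ _ (by simpa using h), List.getD_eq_default _ _ h]
    split_ifs with h1
    · omega
    · rfl

lemma pvUpd_length (mat : List (List Int)) (a b v : Int) :
    (pvUpd mat a b v).length = mat.length := by
  simp [pvUpd]

lemma pvUpd_row_length (mat : List (List Int)) (a b v : Int) (r : Nat) :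
    ((pvUpd mat a b v).getD r []).length = (mat.getD r []).length := by
  unfold pvUpd
  rw [pv_getD_set]
  split_ifs with h
  · rw [List.length_set, h.1]
  · rfl

lemma pvEntry_pvUpd (mat : List (List Int)) (a b v : Int) (i j : Nat) :
    pvEntry (pvUpd mat a b v) i j =
      if a.toNat = i ∧ b.toNat = j ∧ a.toNat < mat.length ∧ b.toNat < (mat.getD a.toNat []).length
      then v else pvEntry mat i j := by
  unfold pvEntry pvUpd
  rw [pv_getD_set]
  split_ifs with h1 h2 h3
  · rw [pv_getD_set]
    rw [if_pos ⟨(by omega), (by rw [h1.1] at h2 ⊢; omega)⟩]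
  · rw [pv_getD_set, if_neg, h1.1]
    rintro ⟨hbj, hb⟩
    exact h2 ⟨h1.1, hbj, h1.2, by rw [h1.1] at hb ⊢; omega⟩
  · exfalso; omega
  · rfl

lemma pvPaint_nil (matriz mat : List (List Int)) : pvPaint matriz mat [] = mat := rfl

lemma pvPaint_cons (matriz mat : List (List Int)) (p : Int × Int) (ps : List (Int × Int)) :
    pvPaint matriz mat (p :: ps) = pvPaint matriz (pvUpd mat p.1 p.2 (pvVal matriz p)) ps := rfl

lemma pvPaint_append (matriz mat : List (List Int)) (l1 l2 : List (Int × Int)) :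
    pvPaint matriz mat (l1 ++ l2) = pvPaint matriz (pvPaint matriz mat l1) l2 := by
  simp [pvPaint, List.foldl_append]

lemma pvPaint_length (matriz : List (List Int)) (ps : List (Int × Int)) :
    ∀ mat, (pvPaint matriz mat ps).length = mat.length := by
  induction ps with
  | nil => intro mat; rfl
  | cons p ps ih => intro mat; rw [pvPaint_cons, ih, pvUpd_length]

lemma pvPaint_row_length (matriz : List (List Int)) (ps : List (Int × Int)) :
    ∀ mat r, ((pvPaint matriz mat ps).getD r []).length = (mat.getD r []).length := by
  induction ps with
  | nil => intro mat r; rfl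
  | cons p ps ih => intro mat r; rw [pvPaint_cons, ih, pvUpd_row_length]

lemma pvEntry_pvPaint (matriz : List (List Int)) (ps : List (Int × Int)) :
    ∀ mat (i j : Nat),
      pvEntry (pvPaint matriz mat ps) i j =
        if ∃ p ∈ ps, p.1.toNat = i ∧ p.2.toNat = j ∧ p.1.toNat < mat.length ∧
            p.2.toNat < (mat.getD p.1.toNat []).length
        then pvEntry matriz i j else pvEntry mat i j := by
  induction ps with
  | nil => intro mat i j; simp [pvPaint_nil]
  | cons p ps ih =>
      intro mat i j
      rw [pvPaint_cons, ih]
      have hlen : (pvUpd mat p.1 p.2 (pvVal matriz p)).length = mat.length := pvUpd_length ..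
      have hrow : ∀ r, ((pvUpd mat p.1 p.2 (pvVal matriz p)).getD r []).length
          = (mat.getD r []).length := fun r => pvUpd_row_length ..
      by_cases hx : ∃ q ∈ ps, q.1.toNat = i ∧ q.2.toNat = j ∧ q.1.toNat < mat.length ∧
          q.2.toNat < (mat.getD q.1.toNat []).length
      · rw [if_pos, if_pos]
        · obtain ⟨q, hq, h⟩ := hx; exact ⟨q, List.mem_cons_of_mem _ hq, h⟩
        · obtain ⟨q, hq, h⟩ := hx; exact ⟨q, hq, by rw [hlen, hrow]; exact h⟩
      · rw [if_neg, pvEntry_pvUpd]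
        · by_cases hp : p.1.toNat = i ∧ p.2.toNat = j ∧ p.1.toNat < mat.length ∧
              p.2.toNat < (mat.getD p.1.toNat []).length
          · rw [if_pos hp, if_pos ⟨p, List.mem_cons_self .., hp⟩]
            unfold pvVal pvEntry
            rw [hp.1, hp.2.1]
          · rw [if_neg hp, if_neg]
            rintro ⟨q, hq, h⟩
            rcases List.mem_cons.1 hq with rfl | hq'
            · exact hp h
            · exact hx ⟨q, hq', h⟩
        · rintro ⟨q, hq, h⟩
          exact hx ⟨q, hq, by rw [hlen, hrow] at h; exact h⟩

lemma pvLoop1_eq (matriz : List (List Int)) (k : Int) (c : Nat) (mat : List (List Int)) :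
    (PySem.List.pyRange 0 (c : Int) 1).foldl
      (fun (st : List (List Int) × Int) i =>
        ((PySem.List.pyRange st.2 k 1).foldl
          (fun m2 j => pvUpd m2 i j ((matriz.getD i.toNat []).getD j.toNat 0)) st.1, st.2 - 1))
      (mat, k - 1)
    = (pvPaint matriz mat
        ((PySem.List.pyRange 0 (c : Int) 1).flatMap
          (fun i => (PySem.List.pyRange (k - 1 - i) k 1).map (fun j => (i, j)))),
       k - 1 - c) := by
  induction c with
  | zero => simp [PySem.List.pyRange_one_eq_nil, pvPaint]
  | succ c ih =>
      have hcast : ((c + 1 : Nat) : Int) = (c : Int) + 1 := by push_cast; ring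
      rw [hcast, PySem.List.pyRange_one_succ_right (by positivity), List.foldl_append, ih,
        List.flatMap_append, pvPaint_append]
      simp only [List.foldl_cons, List.foldl_nil, List.flatMap_cons, List.flatMap_nil,
        List.append_nil]
      refine Prod.ext ?_ (by simp; ring)
      simp only [pvPaint, List.foldl_map]
      rfl

lemma pvLoop2_eq (matriz : List (List Int)) (k : Int) (c : Nat) (mat : List (List Int)) :
    (PySem.List.pyRange k (k + (c : Int)) 1).foldl
      (fun (st : List (List Int) × Int) i =>
        ((PySem.List.pyRange st.2 k 1).foldl
          (fun m2 j => pvUpd m2 i j ((matriz.getD i.toNat []).getD j.toNat 0)) st.1, st.2 + 1))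
      (mat, 0)
    = (pvPaint matriz mat
        ((PySem.List.pyRange k (k + (c : Int)) 1).flatMap
          (fun i => (PySem.List.pyRange (i - k) k 1).map (fun j => (i, j)))),
       (c : Int)) := by
  induction c with
  | zero => simp [PySem.List.pyRange_one_eq_nil, pvPaint]
  | succ c ih =>
      have hcast : k + ((c + 1 : Nat) : Int) = (k + c) + 1 := by push_cast; ring
      rw [hcast, PySem.List.pyRange_one_succ_right (by omega), List.foldl_append, ih,
        List.flatMap_append, pvPaint_append]
      simp only [List.foldl_cons, List.foldl_nil, List.flatMap_cons, List.flatMap_nil,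
        List.append_nil]
      refine Prod.ext ?_ (by simp)
      have h2 : k + (c : Int) - k = (c : Int) := by ring
      simp only [h2, pvPaint, List.foldl_map]
      rfl

lemma pvLoop3_eq (matriz : List (List Int)) (k : Int) (c : Nat) (mat : List (List Int)) :
    (PySem.List.pyRange 0 (c : Int) 1).foldl
      (fun (st : List (List Int) × Int) i =>
        ((PySem.List.pyRange k st.2 1).foldl
          (fun m2 j => pvUpd m2 i j ((matriz.getD i.toNat []).getD j.toNat 0)) st.1, st.2 + 1))
      (mat, k + 1)
    = (pvPaint matriz mat
        ((PySem.List.pyRange 0 (c : Int) 1).flatMap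
          (fun i => (PySem.List.pyRange k (k + 1 + i) 1).map (fun j => (i, j)))),
       k + 1 + c) := by
  induction c with
  | zero => simp [PySem.List.pyRange_one_eq_nil, pvPaint]
  | succ c ih =>
      have hcast : ((c + 1 : Nat) : Int) = (c : Int) + 1 := by push_cast; ring
      rw [hcast, PySem.List.pyRange_one_succ_right (by positivity), List.foldl_append, ih,
        List.flatMap_append, pvPaint_append]
      simp only [List.foldl_cons, List.foldl_nil, List.flatMap_cons, List.flatMap_nil,
        List.append_nil]
      refine Prod.ext ?_ (by simp; ring)
      simp only [pvPaint, List.foldl_map]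
      rfl

lemma pvLoop4_eq (matriz : List (List Int)) (k u0 : Int) (c : Nat) (mat : List (List Int)) :
    (PySem.List.pyRange k (k + (c : Int)) 1).foldl
      (fun (st : List (List Int) × Int) i =>
        ((PySem.List.pyRange k st.2 1).foldl
          (fun m2 j => pvUpd m2 i j ((matriz.getD i.toNat []).getD j.toNat 0)) st.1, st.2 - 1))
      (mat, u0)
    = (pvPaint matriz mat
        ((PySem.List.pyRange k (k + (c : Int)) 1).flatMap
          (fun i => (PySem.List.pyRange k (u0 - (i - k)) 1).map (fun j => (i, j)))),
       u0 - c) := by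
  induction c with
  | zero => simp [PySem.List.pyRange_one_eq_nil, pvPaint]
  | succ c ih =>
      have hcast : k + ((c + 1 : Nat) : Int) = (k + c) + 1 := by push_cast; ring
      rw [hcast, PySem.List.pyRange_one_succ_right (by omega), List.foldl_append, ih,
        List.flatMap_append, pvPaint_append]
      simp only [List.foldl_cons, List.foldl_nil, List.flatMap_cons, List.flatMap_nil,
        List.append_nil]
      refine Prod.ext ?_ (by simp; ring)
      have h2 : u0 - (k + (c : Int) - k) = u0 - (c : Int) := by ring
      simp only [h2, pvPaint, List.foldl_map]
      rfl

lemma pvInicializacionMatriz_eq (m : Int) :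
    pvInicializacionMatriz m = List.replicate m.toNat (List.replicate m.toNat 0) := by
  unfold pvInicializacionMatriz
  rw [PySem.List.foldl_append_singleton_eq_map, List.nil_append, List.map_const',
    PySem.List.length_pyRange_one]
  norm_num

lemma RomboPares_eq_paint (matriz : List (List Int)) (m : Int) :
    RomboPares matriz m = pvPaint matriz (pvInicializacionMatriz m) (pvDiamond matriz.length) := by
  have hk : PySem.Int.floordiv ((matriz.length : Nat) : Int) 2 = ((matriz.length / 2 : Nat) : Int) := by
    exact_mod_cast PySem.Int.floordiv_natCast matriz.length 2
  have hsplit : ((matriz.length / 2 : Nat) : Int) + ((matriz.length - matriz.length / 2 : Nat) : Int)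
      = (matriz.length : Int) := by omega
  unfold RomboPares
  simp only [PySem.List.len_eq, hk]
  have h1 := pvLoop1_eq matriz ((matriz.length / 2 : Nat) : Int) (matriz.length / 2)
    (pvInicializacionMatriz m)
  rw [h1]
  have h2 := pvLoop2_eq matriz ((matriz.length / 2 : Nat) : Int) (matriz.length - matriz.length / 2)
    (pvPaint matriz (pvInicializacionMatriz m)
      ((PySem.List.pyRange 0 ((matriz.length / 2 : Nat) : Int) 1).flatMap
        (fun i => (PySem.List.pyRange (((matriz.length / 2 : Nat) : Int) - 1 - i)
          ((matriz.length / 2 : Nat) : Int) 1).map (fun j => (i, j)))))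
  rw [hsplit] at h2
  rw [h2]
  rw [pvLoop3_eq]
  have h4 := pvLoop4_eq matriz ((matriz.length / 2 : Nat) : Int) ((matriz.length : Nat) : Int)
    (matriz.length - matriz.length / 2)
    (pvPaint matriz
      (pvPaint matriz
        (pvPaint matriz (pvInicializacionMatriz m)
          ((PySem.List.pyRange 0 ((matriz.length / 2 : Nat) : Int) 1).flatMap
            (fun i => (PySem.List.pyRange (((matriz.length / 2 : Nat) : Int) - 1 - i)
              ((matriz.length / 2 : Nat) : Int) 1).map (fun j => (i, j)))))
        ((PySem.List.pyRange ((matriz.length / 2 : Nat) : Int) ((matriz.length : Nat) : Int) 1).flatMap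
          (fun i => (PySem.List.pyRange (i - ((matriz.length / 2 : Nat) : Int))
            ((matriz.length / 2 : Nat) : Int) 1).map (fun j => (i, j)))))
      ((PySem.List.pyRange 0 ((matriz.length / 2 : Nat) : Int) 1).flatMap
        (fun i => (PySem.List.pyRange ((matriz.length / 2 : Nat) : Int)
          (((matriz.length / 2 : Nat) : Int) + 1 + i) 1).map (fun j => (i, j)))))
  rw [hsplit] at h4
  rw [h4]
  unfold pvDiamond
  rw [pvPaint_append, pvPaint_append, pvPaint_append]

lemma mem_pvDiamond (N : Nat) (x y : Int) :
    (x, y) ∈ pvDiamond N ↔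
      ((0 ≤ x ∧ x < ((N / 2 : Nat) : Int) ∧
          ((N / 2 : Nat) : Int) - 1 - x ≤ y ∧ y ≤ ((N / 2 : Nat) : Int) + x) ∨
       (((N / 2 : Nat) : Int) ≤ x ∧ x < (N : Int) ∧
          x - ((N / 2 : Nat) : Int) ≤ y ∧ y ≤ (N : Int) - 1 - x + ((N / 2 : Nat) : Int))) := by
  simp only [pvDiamond, List.mem_append, List.mem_flatMap, List.mem_map,
    PySem.List.mem_pyRange_one, Prod.mk.injEq]
  constructor
  · rintro (((⟨i, hi, j, hj, rfl, rfl⟩ | ⟨i, hi, j, hj, rfl, rfl⟩) |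
      ⟨i, hi, j, hj, rfl, rfl⟩) | ⟨i, hi, j, hj, rfl, rfl⟩) <;> omega
  · rintro (h | h)
    · by_cases hy : y < ((N / 2 : Nat) : Int)
      · exact Or.inl (Or.inl (Or.inl ⟨x, by omega, y, by omega, rfl, rfl⟩))
      · exact Or.inl (Or.inr ⟨x, by omega, y, by omega, rfl, rfl⟩)
    · by_cases hy : y < ((N / 2 : Nat) : Int)
      · exact Or.inl (Or.inl (Or.inr ⟨x, by omega, y, by omega, rfl, rfl⟩))
      · exact Or.inr ⟨x, by omega, y, by omega, rfl, rfl⟩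

lemma pvDiamond_bounds (N : Nat) (p : Int × Int) (hp : p ∈ pvDiamond N) :
    0 ≤ p.1 ∧ p.1 < (N : Int) ∧ 0 ≤ p.2 ∧ p.2 < (N : Int) := by
  obtain ⟨x, y⟩ := p
  rw [mem_pvDiamond] at hp
  have h2 : N / 2 ≤ N := Nat.div_le_self N 2
  have h3 : N ≤ N / 2 * 2 + 1 := by omega
  simp only [] at hp ⊢
  omega

lemma pv_getD_replicate {A : Type} (a : Nat) (x d : A) (i : Nat) :
    (List.replicate a x).getD i d = if i < a then x else d := by
  rcases Nat.lt_or_ge i a with h | h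
  · rw [List.getD_eq_getElem _ _ (by simpa using h), List.getElem_replicate, if_pos h]
  · rw [List.getD_eq_default _ _ (by simpa using h), if_neg (by omega)]

lemma pv_main (matriz : List (List Int)) (m : Int)
    (hm : matriz.length = 0 ∨ (matriz.length : Int) ≤ m) :
    RomboPares matriz m = RomboPares_alt matriz m := by
  have hk : PySem.Int.floordiv ((matriz.length : Nat) : Int) 2 = ((matriz.length / 2 : Nat) : Int) := by
    exact_mod_cast PySem.Int.floordiv_natCast matriz.length 2
  have hdiv2 : matriz.length / 2 ≤ matriz.length := Nat.div_le_self _ 2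
  have hdiv3 : matriz.length ≤ matriz.length / 2 * 2 + 1 := by omega
  -- the painted zero matrix
  rw [RomboPares_eq_paint, pvInicializacionMatriz_eq]
  unfold RomboPares_alt
  simp only [PySem.List.len_eq, hk]
  -- bounds of painted cells
  have hcell : ∀ p ∈ pvDiamond matriz.length,
      p.1.toNat < (List.replicate m.toNat (List.replicate m.toNat (0:Int))).length ∧
      p.2.toNat < ((List.replicate m.toNat (List.replicate m.toNat (0:Int))).getD p.1.toNat []).length := by
    intro p hp
    have hb := pvDiamond_bounds matriz.length p hp
    have hmn : (matriz.length : Int) ≤ m := by omega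
    have h1 : p.1.toNat < m.toNat := by omega
    refine ⟨by simpa using h1, ?_⟩
    rw [pv_getD_replicate, if_pos h1, List.length_replicate]
    omega
  apply List.ext_getElem
  · rw [pvPaint_length, List.length_replicate, List.length_map, PySem.List.length_pyRange_one]
    norm_num
  intro i hiL hiR
  have him : i < m.toNat := by
    rw [pvPaint_length, List.length_replicate] at hiL; exact hiL
  have hiR' : i < (PySem.List.pyRange 0 m 1).length := by
    rw [List.length_map] at hiR; exact hiR
  rw [List.getElem_map, PySem.List.getElem_pyRange_one]
  simp only [zero_add]
  apply List.ext_getElem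
  · rw [← List.getD_eq_getElem _ [] , pvPaint_row_length, pv_getD_replicate, if_pos him,
      List.length_replicate]
    split_ifs <;> simp [PySem.List.length_pyRange_one]
  intro j hjL hjR
  have hjm : j < m.toNat := by
    rw [← List.getD_eq_getElem _ [], pvPaint_row_length, pv_getD_replicate, if_pos him,
      List.length_replicate] at hjL
    exact hjL
  -- left entry via pvEntry_pvPaint
  have hL : (pvPaint matriz (List.replicate m.toNat (List.replicate m.toNat 0)) (pvDiamond matriz.length))[i][j]
      = pvEntry (pvPaint matriz (List.replicate m.toNat (List.replicate m.toNat 0)) (pvDiamond matriz.length)) i j := by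
    rw [pvEntry, List.getD_eq_getElem _ [] , List.getD_eq_getElem _ 0]
  rw [hL, pvEntry_pvPaint]
  have hzero : pvEntry (List.replicate m.toNat (List.replicate m.toNat (0:Int))) i j = 0 := by
    rw [pvEntry, pv_getD_replicate, if_pos him, pv_getD_replicate, if_pos hjm]
  -- simplify the hit condition to diamond membership of (i, j)
  have hhit : (∃ p ∈ pvDiamond matriz.length, p.1.toNat = i ∧ p.2.toNat = j ∧
        p.1.toNat < (List.replicate m.toNat (List.replicate m.toNat (0:Int))).length ∧
        p.2.toNat < ((List.replicate m.toNat (List.replicate m.toNat (0:Int))).getD p.1.toNat []).length)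
      ↔ ((i : Int), (j : Int)) ∈ pvDiamond matriz.length := by
    constructor
    · rintro ⟨p, hp, h1, h2, -⟩
      have hb := pvDiamond_bounds matriz.length p hp
      have e1 : p.1 = (i : Int) := by omega
      have e2 : p.2 = (j : Int) := by omega
      rwa [← e1, ← e2, Prod.mk.eta]
    · intro hp
      exact ⟨((i : Int), (j : Int)), hp, by simp, by simp, hcell _ hp⟩
  by_cases h1 : ((i : Int), (j : Int)) ∈ pvDiamond matriz.length
  · -- painted cell: the diamond contains (i, j)
    rw [if_pos (hhit.2 h1)]
    have hmem := h1
    rw [mem_pvDiamond] at hmem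
    have hiN : ((i : Nat) : Int) < (matriz.length : Int) := by omega
    simp only [if_pos hiN, List.getElem_map, PySem.List.getElem_pyRange_one, zero_add]
    rw [if_pos (by split_ifs with hik <;> omega)]
    simp [pvEntry]
  · -- unpainted cell: value 0 on both sides
    rw [if_neg (fun hc => h1 (hhit.1 hc)), hzero]
    have hmem := h1
    rw [mem_pvDiamond] at hmem
    by_cases hiN : ((i : Nat) : Int) < (matriz.length : Int)
    · simp only [if_pos hiN, List.getElem_map, PySem.List.getElem_pyRange_one, zero_add]
      rw [if_neg (by split_ifs with hik <;> omega)]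
    · simp only [if_neg hiN, List.getElem_replicate]

-- ===== VERDICT (by name: the statement is the Claim_ definition above) =====
theorem RomboPares_spec : Claim_equal_RomboPares := by
  intro matriz m hDom hPre
  unfold Spec_RomboPares
  rcases hPre with h | h
  · exact pv_main matriz m (Or.inl (by rw [h]; rfl))
  · exact pv_main matriz m (Or.inr h.1)
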